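-- pv_equiv track=rewrite | github.com/JeanPaulVidal/JPVCVerano2024T1 | CodeBase/.ipynb_checkpoints/DatosAgrupados-checkpoint.py | faGrouped
-- ===== SOURCE A (Python) =====
-- def faGrouped(limSup, limInf, datos):
--     fa = [0] * len(limInf)
--     for dato in datos:
--         for j in range(len(limInf)):
--             if limInf[j] <= dato <= limSup[j]:
--                 fa[j] += 1
--                 break
--
--     return fa
-- ===== SOURCE B (Python) =====
-- def faGrouped(limSup, limInf, datos):
--     # interval-major: for each class, count matching data among the still-unclassified
--     # data, then drop the matched ones, so first-match semantics is preserved.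
--     fa = []
--     remaining = datos
--     for lo, hi in zip(limInf, limSup):
--         matched = 0
--         rest = []
--         for d in remaining:
--             if lo <= d <= hi:
--                 matched += 1
--             else:
--                 rest.append(d)
--         remaining = rest
--         fa.append(matched)
--     return fa
-- ===== Notes on version B (the rewrite author's own statement) =====
-- stated objective: alternative
-- what changed: B iterates interval-major over zip(limInf,limSup), counting matches among the still-unclassified data and dropping them, instead of A's datum-major scan with an inner break loop over all class indices.
-- outside the precondition, e.g. on faGrouped([], [5], [1]): A returns [0], B returns []
import Mathlib
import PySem

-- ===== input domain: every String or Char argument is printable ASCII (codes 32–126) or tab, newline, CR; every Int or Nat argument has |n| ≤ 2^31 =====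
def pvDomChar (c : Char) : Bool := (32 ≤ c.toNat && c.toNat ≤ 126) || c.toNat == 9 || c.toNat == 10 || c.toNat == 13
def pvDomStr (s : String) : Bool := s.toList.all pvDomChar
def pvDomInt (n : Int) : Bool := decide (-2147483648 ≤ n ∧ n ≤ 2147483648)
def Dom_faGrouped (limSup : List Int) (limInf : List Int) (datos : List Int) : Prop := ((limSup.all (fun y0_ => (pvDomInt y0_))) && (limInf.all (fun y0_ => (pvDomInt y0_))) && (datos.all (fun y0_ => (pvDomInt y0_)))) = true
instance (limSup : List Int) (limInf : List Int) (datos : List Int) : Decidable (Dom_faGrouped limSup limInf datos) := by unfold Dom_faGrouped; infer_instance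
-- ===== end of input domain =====

-- B counts interval-major over zip(limInf,limSup), dropping classified data, instead of
-- A's datum-major scan with an inner break loop; same results, a genuinely different traversal.


-- shared helper: Python's chained comparison `lo <= d <= hi`
def pvMatch (lo hi d : Int) : Bool := decide (lo ≤ d) && decide (d ≤ hi)

-- ===== PORT A =====
-- inner `for j in range(len(limInf)): if …: fa[j] += 1; break`
-- first matching index (accesses are in range on every input Pre_ admits)
def faFindJ (limSup limInf : List Int) (dato : Int) : Option Nat :=
  (List.range limInf.length).find? (fun j => pvMatch (limInf.getD j 0) (limSup.getD j 0) dato)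

def faStep (limSup limInf : List Int) (fa : List Int) (dato : Int) : List Int :=
  match faFindJ limSup limInf dato with
  | some j => fa.set j (fa.getD j 0 + 1)
  | none => fa

def faGrouped (limSup : List Int) (limInf : List Int) (datos : List Int) : List Int :=
  datos.foldl (faStep limSup limInf) (List.replicate limInf.length 0)

-- ===== PORT B =====
def bStep (lo hi : Int) (p : Int × List Int) (d : Int) : Int × List Int :=
  if pvMatch lo hi d then (p.1 + 1, p.2) else (p.1, p.2 ++ [d])

def bGo : List (Int × Int) → List Int → List Int
  | [], _ => []
  | (lo, hi) :: rest, remaining =>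
    let r := remaining.foldl (bStep lo hi) (0, [])
    r.1 :: bGo rest r.2

def faGrouped_alt (limSup : List Int) (limInf : List Int) (datos : List Int) : List Int :=
  bGo (limInf.zip limSup) datos

-- ===== PRECONDITION & SPEC =====
-- A raises IndexError when limSup is shorter than limInf and some datum reaches such an
-- index; Pre_ excludes all mismatched-length limit lists (also the ones where A happens to
-- return because no datum reaches the missing upper limit — there the returned value is an
-- accident of the data, and B's zip naturally truncates to the shorter list).
def Pre_faGrouped (limSup : List Int) (limInf : List Int) (datos : List Int) : Prop :=
  limInf.length ≤ limSup.length
instance (limSup : List Int) (limInf : List Int) (datos : List Int) : Decidable (Pre_faGrouped limSup limInf datos) := by unfold Pre_faGrouped; infer_instance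

def pvWitness_faGrouped : List Int × List Int × List Int := ([10, 20], [1, 11], [5, 15, 3])

def Spec_faGrouped (limSup : List Int) (limInf : List Int) (datos : List Int) (out : List Int) : Prop := out = faGrouped_alt limSup limInf datos
instance (limSup : List Int) (limInf : List Int) (datos : List Int) (out : List Int) : Decidable (Spec_faGrouped limSup limInf datos out) := by unfold Spec_faGrouped; infer_instance

-- ===== CLAIM (what is proved, stated in full; the proofs are below) =====
def Claim_equal_faGrouped : Prop := ∀ (limSup : List Int) (limInf : List Int) (datos : List Int), Dom_faGrouped limSup limInf datos → Pre_faGrouped limSup limInf datos → Spec_faGrouped limSup limInf datos (faGrouped limSup limInf datos)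

-- ===== LEMMAS AND PROOFS =====

-- reference function both ports are reduced to: interval-major count/filter
def specF : List Int → List Int → List Int → List Int
  | lo :: li, hi :: ls, ds =>
    ds.countP (pvMatch lo hi) :: specF li ls (ds.filter (fun d => !pvMatch lo hi d))
  | _, _, _ => []

def indic : List Int → List Int → Int → List Int
  | lo :: li, hi :: ls, d =>
    if pvMatch lo hi d then (1 : Int) :: List.replicate li.length 0 else 0 :: indic li ls d
  | _, _, _ => []

theorem zipWith_zero_right (fa : List Int) :
    List.zipWith (· + ·) fa (List.replicate fa.length 0) = fa := by
  induction fa with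
  | nil => rfl
  | cons f fs ih => simp [List.replicate_succ, ih]

theorem zipWith_zero_left (x : List Int) :
    List.zipWith (· + ·) (List.replicate x.length 0) x = x := by
  induction x with
  | nil => rfl
  | cons f fs ih => simp [List.replicate_succ, ih]

theorem indic_length (li ls : List Int) (d : Int) (h : li.length ≤ ls.length) :
    (indic li ls d).length = li.length := by
  induction li generalizing ls with
  | nil => rfl
  | cons lo li ih =>
    cases ls with
    | nil => simp at h
    | cons hi ls =>
      simp only [indic]
      split <;> simp_all

theorem specF_length (li ls ds : List Int) (h : li.length ≤ ls.length) :
    (specF li ls ds).length = li.length := by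
  induction li generalizing ls ds with
  | nil => rfl
  | cons lo li ih =>
    cases ls with
    | nil => simp at h
    | cons hi ls => simp only [specF, List.length_cons]; simp_all

theorem specF_nil (li ls : List Int) (h : li.length ≤ ls.length) :
    specF li ls [] = List.replicate li.length 0 := by
  induction li generalizing ls with
  | nil => rfl
  | cons lo li ih =>
    cases ls with
    | nil => simp at h
    | cons hi ls =>
      simp only [List.length_cons, Nat.succ_le_succ_iff] at h
      simp [specF, List.replicate_succ, ih ls h, List.countP]

theorem specF_cons (li ls : List Int) (d : Int) (ds : List Int) (h : li.length ≤ ls.length) :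
    specF li ls (d :: ds) =
      List.zipWith (· + ·) (indic li ls d) (specF li ls ds) := by
  induction li generalizing ls ds with
  | nil => rfl
  | cons lo li ih =>
    cases ls with
    | nil => simp at h
    | cons hi ls =>
      simp only [List.length_cons, Nat.succ_le_succ_iff] at h
      by_cases hm : pvMatch lo hi d
      · simp only [specF, indic, hm, if_pos, List.countP_cons, List.filter_cons,
          Bool.not_true, List.zipWith_cons_cons, List.cons.injEq, Bool.false_eq_true,
          if_false]
        refine ⟨by push_cast; omega, ?_⟩
        rw [← specF_length li ls (ds.filter (fun d => !pvMatch lo hi d)) h,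
          zipWith_zero_left]
      · simp only [specF, indic, hm, List.countP_cons, List.filter_cons,
          Bool.not_false, List.zipWith_cons_cons, List.cons.injEq, Bool.false_eq_true,
          if_false, if_true]
        exact ⟨by push_cast; omega, ih ls (ds.filter (fun d => !pvMatch lo hi d)) h⟩

theorem zipWith_add_assoc (a b c : List Int) :
    List.zipWith (· + ·) (List.zipWith (· + ·) a b) c =
      List.zipWith (· + ·) a (List.zipWith (· + ·) b c) := by
  induction a generalizing b c with
  | nil => rfl
  | cons x a ih =>
    cases b with
    | nil => rfl
    | cons y b =>
      cases c with
      | nil => rfl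
      | cons z c => simp [ih, Int.add_assoc]

theorem faFindJ_cons (lo hi : Int) (li ls : List Int) (d : Int) :
    faFindJ (hi :: ls) (lo :: li) d =
      if pvMatch lo hi d then some 0 else (faFindJ ls li d).map (· + 1) := by
  simp only [faFindJ, List.length_cons, List.range_succ_eq_map, List.find?_cons]
  by_cases hm : pvMatch lo hi d
  · simp [hm]
  · simp only [List.getD_cons_zero, hm, List.find?_map]
    congr 1

theorem faStep_eq (li ls fa : List Int) (d : Int)
    (hlen : fa.length = li.length) (h : li.length ≤ ls.length) :
    faStep ls li fa d = List.zipWith (· + ·) fa (indic li ls d) := by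
  induction li generalizing ls fa with
  | nil =>
    cases fa with
    | nil => rfl
    | cons _ _ => simp at hlen
  | cons lo li ih =>
    cases ls with
    | nil => simp at h
    | cons hi ls =>
      cases fa with
      | nil => simp at hlen
      | cons f fa =>
        simp only [List.length_cons, Nat.succ_le_succ_iff] at h
        simp only [List.length_cons, Nat.succ_inj] at hlen
        by_cases hm : pvMatch lo hi d
        · simp only [faStep, faFindJ_cons, hm, if_pos, indic, List.zipWith_cons_cons,
            List.set_cons_zero, List.getD_cons_zero]
          rw [← hlen, zipWith_zero_right]
        · have := ih ls fa hlen h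
          simp only [faStep] at this
          simp only [faStep, faFindJ_cons, hm, if_neg, indic, List.zipWith_cons_cons,
            if_false]
          cases hfind : faFindJ ls li d with
          | none =>
            simp only [hfind, Option.map_none] at *
            simp [← this, Int.add_zero]
          | some j =>
            simp only [hfind, Option.map_some] at *
            simp [← this, List.set_cons_succ, List.getD_cons_succ, Int.add_zero]

theorem foldl_faStep (li ls : List Int) (ds : List Int) (fa : List Int)
    (hlen : fa.length = li.length) (h : li.length ≤ ls.length) :
    ds.foldl (faStep ls li) fa = List.zipWith (· + ·) fa (specF li ls ds) := by
  induction ds generalizing fa with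
  | nil => simp [specF_nil li ls h, ← hlen, zipWith_zero_right]
  | cons d ds ih =>
    have hstep := faStep_eq li ls fa d hlen h
    have hstep_len : (faStep ls li fa d).length = li.length := by
      rw [hstep, List.length_zipWith, indic_length li ls d h, hlen]
      omega
    rw [List.foldl_cons, ih (faStep ls li fa d) hstep_len, hstep, zipWith_add_assoc,
      ← specF_cons li ls d ds h]

theorem bFold (lo hi : Int) (ds : List Int) (m : Int) (acc : List Int) :
    ds.foldl (bStep lo hi) (m, acc) =
      (m + ds.countP (pvMatch lo hi), acc ++ ds.filter (fun d => !pvMatch lo hi d)) := by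
  induction ds generalizing m acc with
  | nil => simp [List.countP]
  | cons d ds ih =>
    by_cases hm : pvMatch lo hi d
    · simp [bStep, hm, ih, List.countP_cons, List.filter_cons]
      omega
    · simp [bStep, hm, ih, List.countP_cons, List.filter_cons, List.append_assoc]

theorem bGo_eq_specF (li ls ds : List Int) : bGo (li.zip ls) ds = specF li ls ds := by
  induction li generalizing ls ds with
  | nil => rfl
  | cons lo li ih =>
    cases ls with
    | nil => rfl
    | cons hi ls =>
      simp only [List.zip_cons_cons, bGo, bFold lo hi ds 0 [], Int.zero_add,
        List.nil_append, specF]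
      exact congrArg _ (ih ls _)

-- ===== VERDICT (by name: the statement is the Claim_ definition above) =====
theorem faGrouped_spec : Claim_equal_faGrouped := by
  intro limSup limInf datos _ hpre
  unfold Spec_faGrouped faGrouped faGrouped_alt
  rw [bGo_eq_specF, foldl_faStep limInf limSup datos _ (List.length_replicate) hpre,
    show limInf.length = (specF limInf limSup datos).length from
      (specF_length limInf limSup datos hpre).symm,
    zipWith_zero_left]
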